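-- pv_equiv track=rewrite | github.com/antonyreis/checkio-solutions | python/strings_theory/caps_lock.py | caps_lock
-- ===== SOURCE A (Python) =====
-- def caps_lock(text: str) -> str:
--     final_word = ""
--     caps = False
--     while text != "":
--         index = text.find("a")
--         if index != -1:
--             final_word += text[:index].replace("a", "").upper() if caps else text[:index].replace("a", "")
--             text = text[index+1:]
--             caps = not caps
--         else:
--             final_word += text.upper() if caps else text
--             text = ""
--
--     return final_word
-- ===== SOURCE B (Python) =====
-- def caps_lock(text: str) -> str:
--     out = []
--     caps = False
--     for ch in text:
--         if ch == 'a':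
--             caps = not caps
--         elif caps:
--             out.append(ch.upper())
--         else:
--             out.append(ch)
--     return "".join(out)
-- ===== Notes on version B (the rewrite author's own statement) =====
-- stated objective: faster
-- what changed: Replaced the repeated find/slice/replace loop over the remaining string with a single character-by-character pass that toggles a caps flag on each 'a' and appends into a list joined once.
import Mathlib
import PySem

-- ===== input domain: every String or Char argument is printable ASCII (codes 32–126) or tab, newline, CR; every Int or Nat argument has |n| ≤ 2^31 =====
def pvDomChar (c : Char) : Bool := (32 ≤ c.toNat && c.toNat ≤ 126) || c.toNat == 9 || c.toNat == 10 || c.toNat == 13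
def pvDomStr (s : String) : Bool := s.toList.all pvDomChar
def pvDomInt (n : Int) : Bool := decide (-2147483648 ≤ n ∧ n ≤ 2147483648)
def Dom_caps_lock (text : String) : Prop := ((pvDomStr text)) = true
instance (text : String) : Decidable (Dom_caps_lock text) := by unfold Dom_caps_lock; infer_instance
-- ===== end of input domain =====

-- B changes the algorithm: one linear pass toggling a caps flag, instead of A's repeated find/slice/replace; asymptotically faster.

-- ===== PORT A =====
-- A's while loop: find the next 'a', emit the chunk before it (upper-cased if caps), drop it, toggle.
def capsALoop (final : List Char) (caps : Bool) (text : List Char) : List Char :=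
  if _h : text = [] then final
  else
    let index := PySem.Chars.find text ['a']
    if hidx : index ≠ -1 then
      let seg := PySem.Chars.replace (PySem.List.slice text none (some index)) ['a'] []
      capsALoop (final ++ (if caps then PySem.Chars.upper seg else seg)) (!caps)
        (PySem.List.slice text (some (index + 1)) none)
    else
      final ++ (if caps then PySem.Chars.upper text else text)
termination_by text.length
decreasing_by
  have h0 : (0:Int) ≤ index := by
    have := PySem.Chars.neg_one_le_find text ['a']
    omega
  have h1 : (0:Int) ≤ index + 1 := by omega
  rw [PySem.List.slice_from _ h1]
  have h2 : 1 ≤ (index + 1).toNat := by omega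
  have h3 : 0 < text.length := List.length_pos_iff.mpr _h
  simp only [List.length_drop]
  omega

def caps_lock (text : String) : String := String.mk (capsALoop [] false text.toList)

-- ===== PORT B =====
def capsBStep (st : Bool × List Char) (c : Char) : Bool × List Char :=
  if c = 'a' then (!st.1, st.2)
  else if st.1 then (st.1, st.2 ++ [PySem.Chars.upperChar c])
  else (st.1, st.2 ++ [c])

def caps_lock_alt (text : String) : String :=
  String.mk (text.toList.foldl capsBStep (false, [])).2

-- ===== PRECONDITION & SPEC =====
def Spec_caps_lock (text : String) (out : String) : Prop := out = caps_lock_alt text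
instance (text : String) (out : String) : Decidable (Spec_caps_lock text out) := by unfold Spec_caps_lock; infer_instance

-- ===== CLAIM (what is proved, stated in full; the proofs are below) =====
def Claim_equal_caps_lock : Prop := ∀ (text : String), Dom_caps_lock text → Spec_caps_lock text (caps_lock text)

-- ===== LEMMAS AND PROOFS =====

-- replace with pattern ['a'] is the identity on a segment with no 'a'
theorem replaceGo_no_a (l : List Char) : ∀ (fuel : Nat) (acc : List Char),
    (∀ c ∈ l, c ≠ 'a') → l.length ≤ fuel →
    PySem.Chars.replace.go ['a'] [] fuel l acc = acc.reverse ++ l := by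
  induction l with
  | nil =>
    intro fuel acc _ _
    cases fuel <;> simp [PySem.Chars.replace.go]
  | cons c t ih =>
    intro fuel acc hno hlen
    cases fuel with
    | zero => simp at hlen
    | succ n =>
      have hc : c ≠ 'a' := hno c (by simp)
      have hpre : List.isPrefixOf ['a'] (c :: t) = false := by
        simp [List.isPrefixOf]
        exact fun h => (hc h.symm).elim
      rw [PySem.Chars.replace.go, hpre]
      simp only [Bool.false_eq_true, if_false]
      rw [ih n (c :: acc) (fun x hx => hno x (by simp [hx])) (by simpa using Nat.lt_succ_iff.mp (by simpa using hlen))]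
      simp

theorem replace_no_a (l : List Char) (hno : ∀ c ∈ l, c ≠ 'a') :
    PySem.Chars.replace l ['a'] [] = l := by
  rw [PySem.Chars.replace]
  simp only [List.isEmpty_cons, Bool.false_eq_true, if_false]
  simpa using replaceGo_no_a l l.length [] hno le_rfl

-- B's fold over a segment with no 'a': caps unchanged, mapped chars appended
def capsMap (caps : Bool) (l : List Char) : List Char :=
  l.map (fun c => if caps then PySem.Chars.upperChar c else c)

theorem foldB_no_a (l : List Char) : ∀ (caps : Bool) (acc : List Char),
    (∀ c ∈ l, c ≠ 'a') →
    l.foldl capsBStep (caps, acc) = (caps, acc ++ capsMap caps l) := by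
  induction l with
  | nil => intro caps acc _; simp [capsMap]
  | cons c t ih =>
    intro caps acc hno
    have hc : c ≠ 'a' := hno c (by simp)
    have h1 : capsBStep (caps, acc) c = (caps, acc ++ [if caps then PySem.Chars.upperChar c else c]) := by
      simp [capsBStep, hc]
      cases caps <;> simp
    simp only [List.foldl_cons, h1]
    rw [ih caps _ (fun x hx => hno x (by simp [hx]))]
    simp [capsMap]

theorem capsMap_eq_if (caps : Bool) (l : List Char) :
    (if caps then PySem.Chars.upper l else l) = capsMap caps l := by
  cases caps <;> simp [capsMap, PySem.Chars.upper]

-- the first occurrence of 'a' splits text into a clean segment, 'a', and a rest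
theorem singleton_prefix_drop {l : List Char} {i : Nat} (h : ['a'] <+: l.drop i)
    (hi : i < l.length) : l[i] = 'a' := by
  obtain ⟨t, ht⟩ := h
  have : (l.drop i)[0]? = some 'a' := by rw [← ht]; rfl
  simpa [List.getElem?_drop, List.getElem?_eq_getElem hi] using this

-- main invariant: A's loop = final ++ B's fold output
theorem capsALoop_eq (n : Nat) : ∀ (text : List Char), text.length ≤ n → ∀ (caps : Bool) (final : List Char),
    capsALoop final caps text = final ++ (text.foldl capsBStep (caps, [])).2 := by
  induction n with
  | zero =>
    intro text hlen caps final
    have : text = [] := List.eq_nil_of_length_eq_zero (Nat.le_zero.mp hlen)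
    subst this
    simp [capsALoop]
  | succ n ih =>
    intro text hlen caps final
    by_cases hnil : text = []
    · subst hnil; simp [capsALoop]
    · rw [capsALoop]
      simp only [hnil, dite_false]
      set index := PySem.Chars.find text ['a'] with hidxdef
      by_cases hidx : index ≠ -1
      · rw [dif_pos hidx]
        have h0 : (0:Int) ≤ index := by
          have := PySem.Chars.neg_one_le_find text ['a']
          omega
        obtain ⟨hpre, hmin⟩ := PySem.Chars.find_spec (s := text) (sub := ['a']) (hidxdef ▸ h0)
        have hlt : index.toNat < text.length := by
          by_contra hge
          push_neg at hge
          rw [List.drop_eq_nil_of_le hge] at hpre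
          exact absurd (List.prefix_nil.mp hpre) (by simp)
        have hsplit : text = text.take index.toNat ++ 'a' :: text.drop (index.toNat + 1) := by
          have hget : text[index.toNat] = 'a' := singleton_prefix_drop hpre hlt
          conv_lhs => rw [← List.take_append_drop index.toNat text]
          rw [List.drop_eq_getElem_cons hlt, hget]
        have hclean : ∀ c ∈ text.take index.toNat, c ≠ 'a' := by
          intro c hc hca
          obtain ⟨i, hi, hgi⟩ := List.mem_take_iff_getElem.mp hc
          have hilt : i < index.toNat := lt_of_lt_of_le hi (min_le_left _ _)
          apply hmin i hilt
          have hil : i < text.length := lt_trans hilt hlt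
          refine ⟨text.drop (i+1), ?_⟩
          rw [List.drop_eq_getElem_cons hil]
          simp [hgi, hca]
        -- rewrite the slices
        have hs1 : PySem.List.slice text none (some index) = text.take index.toNat :=
          PySem.List.slice_to text h0
        have hs2 : PySem.List.slice text (some (index + 1)) none = text.drop (index.toNat + 1) := by
          rw [PySem.List.slice_from text (by omega)]
          congr 1
          omega
        rw [hs1, hs2, replace_no_a _ hclean, capsMap_eq_if]
        have hlen2 : (text.drop (index.toNat + 1)).length ≤ n := by
          simp only [List.length_drop]
          omega
        rw [ih _ hlen2]
        -- compute B's fold on the decomposed text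
        conv_rhs => rw [hsplit]
        rw [List.foldl_append, foldB_no_a _ caps [] hclean]
        have hstepa : capsBStep (caps, capsMap caps (text.take index.toNat)) 'a'
            = (!caps, capsMap caps (text.take index.toNat)) := by
          simp [capsBStep]
        simp only [List.nil_append]
        simp only [List.foldl_cons, hstepa]
        -- pull the accumulator out of the fold
        have hacc : ∀ (l : List Char) (st : Bool × List Char),
            l.foldl capsBStep st = ((l.foldl capsBStep (st.1, [])).1, st.2 ++ (l.foldl capsBStep (st.1, [])).2) := by
          intro l
          induction l with
          | nil => intro st; simp
          | cons c t ihl =>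
            intro st
            have hstep : capsBStep st c = ((capsBStep (st.1, []) c).1, st.2 ++ (capsBStep (st.1, []) c).2) := by
              obtain ⟨b, acc⟩ := st
              by_cases hca : c = 'a' <;> cases b <;> simp [capsBStep, hca]
            simp only [List.foldl_cons]
            rw [ihl (capsBStep st c), ihl (capsBStep (st.1, []) c), hstep]
            simp
        rw [hacc _ ((!caps), capsMap caps (text.take index.toNat))]
        simp
      · rw [dif_neg hidx]
        push_neg at hidx
        have hnoa : ∀ c ∈ text, c ≠ 'a' := by
          intro c hc hca
          have : ¬ (['a'] <:+: text) := (PySem.Chars.find_eq_neg_one_iff text ['a']).mp hidx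
          apply this
          subst hca
          obtain ⟨i, hil, hgi⟩ := List.mem_iff_getElem.mp hc
          exact ⟨text.take i, text.drop (i+1), by
            conv_rhs => rw [← List.take_append_drop i text]
            rw [List.drop_eq_getElem_cons hil, hgi]
            simp⟩
        rw [foldB_no_a _ caps [] hnoa, capsMap_eq_if]
        simp

-- ===== VERDICT (by name: the statement is the Claim_ definition above) =====
theorem caps_lock_spec : Claim_equal_caps_lock := by
  intro text _
  unfold Spec_caps_lock caps_lock caps_lock_alt
  rw [capsALoop_eq text.toList.length text.toList le_rfl false []]
  simp
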